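-- pv_equiv track=rewrite | github.com/jinyi233/TransE | TransE_1.0.py | tri2pair
-- ===== SOURCE A (Python) =====
-- def tri2pair(triList):
--     hrtPair = {}
--     trhPair = {}
--     for h, t, r in triList:
--         if h not in hrtPair:
--             hrtPair[h] = {}
--         if r not in hrtPair[h]:
--             hrtPair[h][r] = set()
--         hrtPair[h][r].add(t)
--
--         if t not in trhPair:
--             trhPair[t] = {}
--         if r not in trhPair[t]:
--             trhPair[t][r] = set()
--         trhPair[t][r].add(h)
--
--     return hrtPair, trhPair
-- ===== SOURCE B (Python) =====
-- def tri2pair(triList):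
--     # group-by decomposition: dedup the keys, then build each bucket by filtering
--     def index(trips):
--         return {k: {r: {v for k2, r2, v in trips if k2 == k and r2 == r}
--                     for r in dict.fromkeys(r2 for k2, r2, _ in trips if k2 == k)}
--                 for k in dict.fromkeys(k for k, _, _ in trips)}
--     return (index([(h, r, t) for h, t, r in triList]),
--             index([(t, r, h) for h, t, r in triList]))
-- ===== Notes on version B (the rewrite author's own statement) =====
-- stated objective: alternative
-- what changed: A builds both nested dicts incrementally in one loop with in-place set mutation; B is a group-by decomposition: it dedups the outer keys and inner relations and builds each bucket by filtering the (projected) triple list, deriving both indexes from one generic 'index' helper.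
import Mathlib
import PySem

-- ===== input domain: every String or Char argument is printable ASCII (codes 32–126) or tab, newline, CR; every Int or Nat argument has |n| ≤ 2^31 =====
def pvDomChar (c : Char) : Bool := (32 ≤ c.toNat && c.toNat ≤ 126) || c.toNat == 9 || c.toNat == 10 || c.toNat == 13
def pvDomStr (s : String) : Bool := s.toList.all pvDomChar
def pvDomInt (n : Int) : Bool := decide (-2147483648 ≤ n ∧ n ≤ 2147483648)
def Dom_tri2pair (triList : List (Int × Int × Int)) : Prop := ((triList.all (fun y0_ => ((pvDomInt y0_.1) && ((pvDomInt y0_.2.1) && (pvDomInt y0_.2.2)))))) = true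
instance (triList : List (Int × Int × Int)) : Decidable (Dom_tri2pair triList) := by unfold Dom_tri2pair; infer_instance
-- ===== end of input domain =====

-- B replaces A's single incremental dict-building pass by a group-by decomposition: dedup the
-- keys, then build each bucket by filtering the triple list (objective: alternative, not faster).

-- ===== PORT A =====
-- one iteration of A's loop body on one of the two nested dicts (k = outer key, r = relation, v = value added to the set)
def pairAdd (d : PySem.Dict Int (PySem.Dict Int (PySem.Set Int))) (k r v : Int) :
    PySem.Dict Int (PySem.Dict Int (PySem.Set Int)) :=
  let d1 := if d.contains k then d else d.insert k PySem.Dict.empty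
  let inner0 := d1.getD k PySem.Dict.empty
  let inner1 := if inner0.contains r then inner0 else inner0.insert r PySem.Set.empty
  d1.insert k (inner1.insert r (PySem.Set.add (inner1.getD r PySem.Set.empty) v))

def tri2pair (triList : List (Int × Int × Int)) :
    (List (Int × List (Int × List Int))) × (List (Int × List (Int × List Int))) :=
  let p := triList.foldl
    (fun st tri => (pairAdd st.1 tri.1 tri.2.2 tri.2.1, pairAdd st.2 tri.2.1 tri.2.2 tri.1))
    (PySem.Dict.empty, PySem.Dict.empty)
  (p.1.items.map (fun q => (q.1, q.2.items)), p.2.items.map (fun q => (q.1, q.2.items)))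

-- ===== PORT B =====
-- Source B's 'index': dict comprehension over the deduped keys, buckets by filtering 'trips'
def indexB (trips : List (Int × Int × Int)) : List (Int × List (Int × List Int)) :=
  (PySem.List.dedup (trips.map (fun p => p.1))).map (fun k =>
    (k, (PySem.List.dedup ((trips.filter (fun p => p.1 == k)).map (fun p => p.2.1))).map (fun r =>
      (r, PySem.Set.ofList ((trips.filter (fun p => p.1 == k && p.2.1 == r)).map (fun p => p.2.2))))))

def tri2pair_alt (triList : List (Int × Int × Int)) :
    (List (Int × List (Int × List Int))) × (List (Int × List (Int × List Int))) :=
  (indexB (triList.map (fun p => (p.1, p.2.2, p.2.1))),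
   indexB (triList.map (fun p => (p.2.1, p.2.2, p.1))))

-- ===== PRECONDITION & SPEC =====
def Spec_tri2pair (triList : List (Int × Int × Int)) (out : (List (Int × List (Int × List Int))) × (List (Int × List (Int × List Int)))) : Prop := out = tri2pair_alt triList
instance (triList : List (Int × Int × Int)) (out : (List (Int × List (Int × List Int))) × (List (Int × List (Int × List Int)))) : Decidable (Spec_tri2pair triList out) := by unfold Spec_tri2pair; infer_instance

-- ===== CLAIM (what is proved, stated in full; the proofs are below) =====
def Claim_equal_tri2pair : Prop := ∀ (triList : List (Int × Int × Int)), Dom_tri2pair triList → Spec_tri2pair triList (tri2pair triList)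

-- ===== LEMMAS AND PROOFS =====

-- canonical form of A's loop body: a nested Dict.modify
def oStep (d : PySem.Dict Int (PySem.Dict Int (PySem.Set Int))) (p : Int × Int × Int) :
    PySem.Dict Int (PySem.Dict Int (PySem.Set Int)) :=
  d.modify p.1 PySem.Dict.empty (fun inner => inner.modify p.2.1 PySem.Set.empty (fun s => PySem.Set.add s p.2.2))

def iStep (e : PySem.Dict Int (PySem.Set Int)) (q : Int × Int × Int) : PySem.Dict Int (PySem.Set Int) :=
  e.modify q.2.1 PySem.Set.empty (fun s => PySem.Set.add s q.2.2)

theorem pairAdd_eq (d : PySem.Dict Int (PySem.Dict Int (PySem.Set Int))) (k r v : Int) :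
    pairAdd d k r v = oStep d (k, r, v) := by
  simp only [pairAdd, oStep, PySem.Dict.modify]
  by_cases hk : d.contains k
  · simp only [hk, if_true]
    by_cases hr : (d.getD k PySem.Dict.empty).contains r
    · simp [hr]
    · simp [hr, PySem.Dict.insert_insert_self, PySem.Dict.getD_insert_self,
        PySem.Dict.getD_of_not_contains _ _ (Bool.of_not_eq_true hr)]
  · simp [hk, PySem.Dict.insert_insert_self, PySem.Dict.getD_insert_self,
      PySem.Dict.getD_of_not_contains _ _ (Bool.of_not_eq_true hk),
      PySem.Dict.contains_empty, PySem.Dict.getD_empty]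

theorem inner_getD (l : List (Int × Int × Int)) (e : PySem.Dict Int (PySem.Set Int)) (r : Int) :
    (l.foldl iStep e).getD r PySem.Set.empty =
      PySem.Set.update (e.getD r PySem.Set.empty)
        ((l.filter (fun q => q.2.1 == r)).map (fun q => q.2.2)) := by
  induction l generalizing e with
  | nil => simp [PySem.Set.update]
  | cons q l ih =>
    simp only [List.foldl_cons, ih, List.filter_cons]
    by_cases h : q.2.1 = r
    · simp [h, iStep, PySem.Set.update_cons]
    · have : (q.2.1 == r) = false := by simp [h]
      simp [this, iStep, PySem.Dict.getD_modify, Ne.symm h]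

theorem outer_getD (l : List (Int × Int × Int)) (d : PySem.Dict Int (PySem.Dict Int (PySem.Set Int))) (c : Int) :
    (l.foldl oStep d).getD c PySem.Dict.empty =
      (l.filter (fun p => p.1 == c)).foldl iStep (d.getD c PySem.Dict.empty) := by
  induction l generalizing d with
  | nil => simp
  | cons p l ih =>
    simp only [List.foldl_cons, ih, List.filter_cons]
    by_cases h : p.1 = c
    · simp [h, oStep, iStep]
    · have : (p.1 == c) = false := by simp [h]
      simp [this, oStep, PySem.Dict.getD_modify, Ne.symm h]

theorem outer_keys (l : List (Int × Int × Int)) :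
    (l.foldl oStep PySem.Dict.empty).keys = PySem.List.dedup (l.map (fun p => p.1)) := by
  have h := PySem.Dict.keys_foldl_modify_key l (fun p => p.1) PySem.Dict.empty
    (fun _ p inner => inner.modify p.2.1 PySem.Set.empty (fun s => PySem.Set.add s p.2.2))
    PySem.Dict.empty
  simpa [oStep, PySem.Dict.keys_empty, PySem.Set.update_nil_left, PySem.List.dedup_eq_ofList] using h

theorem outer_nodup (l : List (Int × Int × Int)) :
    (l.foldl oStep PySem.Dict.empty).keys.Nodup := by
  have h := PySem.Dict.nodup_keys_foldl_modify_key l (fun p => p.1) PySem.Dict.empty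
    (fun _ p inner => inner.modify p.2.1 PySem.Set.empty (fun s => PySem.Set.add s p.2.2))
    PySem.Dict.empty (by simp [PySem.Dict.keys_empty])
  simpa [oStep] using h

theorem inner_keys (l : List (Int × Int × Int)) :
    (l.foldl iStep PySem.Dict.empty).keys = PySem.List.dedup (l.map (fun q => q.2.1)) := by
  have h := PySem.Dict.keys_foldl_modify_key l (fun q => q.2.1) PySem.Set.empty
    (fun _ q s => PySem.Set.add s q.2.2) PySem.Dict.empty
  simpa [iStep, PySem.Dict.keys_empty, PySem.Set.update_nil_left, PySem.List.dedup_eq_ofList] using h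

theorem inner_nodup (l : List (Int × Int × Int)) :
    (l.foldl iStep PySem.Dict.empty).keys.Nodup := by
  have h := PySem.Dict.nodup_keys_foldl_modify_key l (fun q => q.2.1) PySem.Set.empty
    (fun _ q s => PySem.Set.add s q.2.2) PySem.Dict.empty (by simp [PySem.Dict.keys_empty])
  simpa [iStep] using h

theorem filter_comm (l : List (Int × Int × Int)) (k r : Int) :
    (l.filter (fun p => p.1 == k)).filter (fun p => p.2.1 == r)
      = l.filter (fun p => p.1 == k && p.2.1 == r) := by
  rw [List.filter_filter]
  exact List.filter_congr (fun p _ => Bool.and_comm _ _)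

theorem fold_items (l : List (Int × Int × Int)) :
    (l.foldl oStep PySem.Dict.empty).items.map (fun q => (q.1, q.2.items)) = indexB l := by
  rw [PySem.Dict.items_eq_map_keys _ (outer_nodup l) PySem.Dict.empty, List.map_map, outer_keys]
  unfold indexB
  refine List.map_congr_left (fun k _ => ?_)
  simp only [Function.comp]
  rw [outer_getD, PySem.Dict.getD_empty]
  refine congrArg _ ?_
  rw [PySem.Dict.items_eq_map_keys _ (inner_nodup _) PySem.Set.empty, inner_keys]
  refine List.map_congr_left (fun r _ => ?_)
  rw [inner_getD, PySem.Dict.getD_empty, filter_comm]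
  simp [PySem.Set.empty, PySem.Set.update_nil_left]

theorem fold_items' (g : (Int × Int × Int) → (Int × Int × Int)) (l : List (Int × Int × Int)) :
    ((l.foldl (fun d tri => oStep d (g tri)) PySem.Dict.empty).items.map (fun q => (q.1, q.2.items)))
      = indexB (l.map g) := by
  rw [← List.foldl_map]
  exact fold_items _

theorem pair_fold (l : List (Int × Int × Int))
    (a b : PySem.Dict Int (PySem.Dict Int (PySem.Set Int))) :
    l.foldl (fun st tri => (oStep st.1 (tri.1, tri.2.2, tri.2.1), oStep st.2 (tri.2.1, tri.2.2, tri.1))) (a, b)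
      = (l.foldl (fun d tri => oStep d (tri.1, tri.2.2, tri.2.1)) a,
         l.foldl (fun d tri => oStep d (tri.2.1, tri.2.2, tri.1)) b) :=
  PySem.List.foldl_prod_mk (fun d tri => oStep d (tri.1, tri.2.2, tri.2.1))
    (fun d tri => oStep d (tri.2.1, tri.2.2, tri.1)) l a b

-- ===== VERDICT (by name: the statement is the Claim_ definition above) =====
theorem tri2pair_spec : Claim_equal_tri2pair := by
  intro triList _
  unfold Spec_tri2pair tri2pair tri2pair_alt
  simp only [pairAdd_eq]
  rw [pair_fold]
  rw [fold_items' (fun tri => (tri.1, tri.2.2, tri.2.1)) triList,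
      fold_items' (fun tri => (tri.2.1, tri.2.2, tri.1)) triList]
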